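-- pv_equiv track=rewrite | github.com/Limonchik/gtool-affine_cipher | gtool.py | galois_pow
-- ===== SOURCE A (Python) =====
-- def poly_div(dividend, divisor, p):
--     dividend = dividend.copy()
--     divisor = divisor.copy()
--
--     if len(divisor) == 0:
--         raise ValueError("Divisor must not be zero.")
--
--     lead = divisor[0]
--     if lead == 0:
--         raise ValueError("Leading coefficient of divisor must be non-zero.")
--
--     quotient = []
--     dividend = [0] * (len(divisor) - 1) + dividend
--     degree_diff = len(dividend) - len(divisor)
--
--     for i in range(degree_diff + 1):
--         curr_lead = dividend[i]
--         if curr_lead == 0: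
--             quotient.append(0)
--             continue
--         factor = curr_lead * pow(lead, -1, p) % p
--         quotient.append(factor)
--         for j in range(len(divisor)):
--             if i + j < len(dividend):
--                 dividend[i + j] = (dividend[i + j] - factor * divisor[j]) % p
--
--     quotient = quotient[:degree_diff + 1]
--     remainder = dividend[len(quotient):]
--     return quotient, remainder
--
-- def poly_mul(poly1, poly2, p):
--     result = [0] * (len(poly1) + len(poly2) - 1)
--     for i, a in enumerate(poly1):
--         for j, b in enumerate(poly2):
--             result[i + j] = (result[i + j] + a * b) % p
--     return result
--
-- def poly_mult_GF(p, n, f, a, b):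
--     product = poly_mul(a, b, p)
--     _, remainder = poly_div(product, f, p)
--     if len(remainder) < n:
--         remainder = [0] * (n - len(remainder)) + remainder
--     return remainder
--
-- def galois_pow(element, exponent, f, p, n):
--     """Возведение элемента в степень."""
--     # Единичный элемент: [0, ..., 0, 1] (константа 1)
--     result = [0] * (n-1) + [1]
--     current = element.copy()
--     while exponent > 0:
--         if exponent % 2 == 1:
--             result = poly_mult_GF(p, n, f, result, current)
--         current = poly_mult_GF(p, n, f, current, current)
--         exponent = exponent // 2
--     return result
-- ===== SOURCE B (Python) =====
-- def galois_pow(element, exponent, f, p, n):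
--     """Exponentiation in GF: per-coefficient gather convolution plus a streaming
--     Horner reduction with a sliding window (no quotient, no long division array)."""
--     m = len(f)
--
--     def conv(a, b):
--         la, lb = len(a), len(b)
--         return [sum(a[i] * b[k - i] for i in range(max(0, k - lb + 1), min(la, k + 1))) % p
--                 for k in range(la + lb - 1)]
--
--     def reduce(poly):
--         inv = pow(f[0], -1, p)
--         w = [0] * (m - 1)
--         for c in poly:
--             block = w + [c]
--             factor = block[0] * inv % p
--             w = [(x - factor * d) % p for x, d in zip(block[1:], f[1:])]
--         return w
--
--     def mult(a, b):
--         r = reduce(conv(a, b))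
--         return [0] * (n - len(r)) + r if len(r) < n else r
--
--     def go(result, current, e):
--         if e <= 0:
--             return result
--         if e % 2 == 1:
--             result = mult(result, current)
--         return go(result, mult(current, current), e // 2)
--
--     return go([0] * (n - 1) + [1], element, exponent)
-- ===== Notes on version B (the rewrite author's own statement) =====
-- stated objective: alternative
-- what changed: Replaces A's polynomial pipeline: the scatter double-loop product becomes a per-coefficient gather convolution, and A's long division over a zero-padded mutable array (building a quotient and slicing the remainder off the end) becomes a quotient-free streaming Horner reduction with an (m-1)-sized sliding window; the exponent loop becomes a tail recursion.
-- outside the precondition, e.g. on galois_pow([0], 1, [2], 4, 1): A returns [0], B raises ValueError; on galois_pow([], 1, [1], 0, 1): A returns [0], B raises ValueError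
import Mathlib
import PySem

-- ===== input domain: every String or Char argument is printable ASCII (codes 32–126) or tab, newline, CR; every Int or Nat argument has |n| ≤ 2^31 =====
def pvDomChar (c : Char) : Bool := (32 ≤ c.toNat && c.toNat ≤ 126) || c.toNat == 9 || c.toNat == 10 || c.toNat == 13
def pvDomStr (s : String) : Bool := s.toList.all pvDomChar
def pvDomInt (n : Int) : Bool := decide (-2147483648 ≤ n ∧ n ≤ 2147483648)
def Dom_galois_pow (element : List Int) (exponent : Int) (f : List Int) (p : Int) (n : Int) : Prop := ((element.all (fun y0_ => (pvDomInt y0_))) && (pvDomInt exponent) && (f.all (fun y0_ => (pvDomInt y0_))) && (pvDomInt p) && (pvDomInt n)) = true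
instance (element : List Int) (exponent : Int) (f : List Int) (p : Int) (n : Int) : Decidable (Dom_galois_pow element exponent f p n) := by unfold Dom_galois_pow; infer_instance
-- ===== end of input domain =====

-- B replaces A's polynomial pipeline: gather (per-coefficient) convolution instead of the
-- scatter double loop, and a quotient-free streaming Horner reduction with a sliding window
-- instead of A's long division over a zero-padded mutable array; the exponent loop becomes a
-- tail recursion.  Objective: alternative decomposition, same asymptotic cost.

-- ===== PORT A =====
-- pow(a, -1, m): Python's modular inverse; returns 0 on the inputs where Python
-- raises (m == 0 or non-coprime base) — those paths are excluded by Pre_galois_pow.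
def pyInvMod (a m : Int) : Int :=
  if m = 0 ∨ Int.gcd a m ≠ 1 then 0 else PySem.Int.mod (Int.gcdA a m) m

def poly_mul (poly1 poly2 : List Int) (p : Int) : List Int :=
  (PySem.List.enumerate poly1).foldl (fun res ia =>
    (PySem.List.enumerate poly2).foldl (fun res jb =>
      res.set (ia.1 + jb.1).toNat
        (PySem.Int.mod (res.getD (ia.1 + jb.1).toNat 0 + ia.2 * jb.2) p)) res)
    (List.replicate (poly1.length + poly2.length - 1) 0)

-- Python raises ValueError when divisor == [] or its leading coefficient is 0;
-- the port returns ([], []) there, outside Pre_galois_pow.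
def poly_div (dividend divisor : List Int) (p : Int) : List Int × List Int :=
  if divisor.length = 0 then ([], [])
  else
    let lead := divisor.headI
    if lead = 0 then ([], [])
    else
      let dvd0 := List.replicate (divisor.length - 1) 0 ++ dividend
      let dd : Int := (dvd0.length : Int) - (divisor.length : Int)
      let st := (PySem.List.pyRange 0 (dd + 1) 1).foldl (fun (st : List Int × List Int) i =>
        let quot := st.1
        let dvd := st.2
        let curr := dvd.getD i.toNat 0
        if curr = 0 then (quot ++ [(0 : Int)], dvd)
        else
          let factor := PySem.Int.mod (curr * pyInvMod lead p) p
          let dvd' := (PySem.List.pyRange 0 (divisor.length : Int) 1).foldl (fun dvd j =>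
            if i + j < (dvd.length : Int) then
              dvd.set (i + j).toNat
                (PySem.Int.mod (dvd.getD (i + j).toNat 0 - factor * divisor.getD j.toNat 0) p)
            else dvd) dvd
          (quot ++ [factor], dvd')) (([] : List Int), dvd0)
      let quotient := st.1.take (dd + 1).toNat
      (quotient, st.2.drop quotient.length)

def poly_mult_GF (p n : Int) (f a b : List Int) : List Int :=
  let product := poly_mul a b p
  let remainder := (poly_div product f p).2
  if (remainder.length : Int) < n then
    List.replicate (n - (remainder.length : Int)).toNat 0 ++ remainder
  else remainder

-- the while-loop of A, recursion on the exponent with the same (result, current) state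
def galois_pow_go (f : List Int) (p n : Int) (result current : List Int) (e : Int) : List Int :=
  if h : 0 < e then
    let result' := if PySem.Int.mod e 2 = 1 then poly_mult_GF p n f result current else result
    galois_pow_go f p n result' (poly_mult_GF p n f current current) (PySem.Int.floordiv e 2)
  else result
  termination_by e.toNat
  decreasing_by
    rw [PySem.Int.floordiv_eq_ediv_of_pos (by norm_num : (0:Int) < 2)]
    omega

def galois_pow (element : List Int) (exponent : Int) (f : List Int) (p : Int) (n : Int) : List Int :=
  galois_pow_go f p n (List.replicate (n - 1).toNat 0 ++ [1]) element exponent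

-- ===== PORT B =====
-- gather convolution: each output coefficient is one direct sum over the valid index window
def pv_conv (p : Int) (a b : List Int) : List Int :=
  (PySem.List.pyRange 0 ((a.length : Int) + (b.length : Int) - 1) 1).map (fun k =>
    PySem.Int.mod
      (((PySem.List.pyRange (max 0 (k - (b.length : Int) + 1)) (min (a.length : Int) (k + 1)) 1).map
        (fun i => a.getD i.toNat 0 * b.getD (k - i).toNat 0)).sum) p)

-- streaming Horner reduction: slide each coefficient into an (m-1)-window, cancel the top.
-- Python's f[0] raises IndexError on empty f (outside Pre_galois_pow; headI gives 0 there).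
def pv_reduce (f : List Int) (p : Int) (poly : List Int) : List Int :=
  let inv := pyInvMod f.headI p
  poly.foldl (fun w c =>
    let block := w ++ [c]
    let factor := PySem.Int.mod (block.headI * inv) p
    List.zipWith (fun x d => PySem.Int.mod (x - factor * d) p) block.tail f.tail)
    (List.replicate (f.length - 1) 0)

def pv_mult (p n : Int) (f a b : List Int) : List Int :=
  let r := pv_reduce f p (pv_conv p a b)
  if (r.length : Int) < n then List.replicate (n - (r.length : Int)).toNat 0 ++ r else r

-- the tail recursion of Source B's go
def galois_pow_alt_go (f : List Int) (p n : Int) (result current : List Int) (e : Int) : List Int :=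
  if h : e ≤ 0 then result
  else
    let result' := if PySem.Int.mod e 2 = 1 then pv_mult p n f result current else result
    galois_pow_alt_go f p n result' (pv_mult p n f current current) (PySem.Int.floordiv e 2)
  termination_by e.toNat
  decreasing_by
    rw [PySem.Int.floordiv_eq_ediv_of_pos (by norm_num : (0:Int) < 2)]
    omega

def galois_pow_alt (element : List Int) (exponent : Int) (f : List Int) (p : Int) (n : Int) : List Int :=
  galois_pow_alt_go f p n (List.replicate (n - 1).toNat 0 ++ [1]) element exponent

-- ===== PRECONDITION & SPEC =====
-- Pre_ excludes (only for exponent > 0) a zero modulus p, an empty f, and an f whose leading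
-- coefficient is 0 or not invertible mod p: there Python A raises (ZeroDivisionError /
-- ValueError / IndexError) except in accidental all-zero-lead cases where A returns but B's
-- up-front pow(f[0], -1, p) raises.
def Pre_galois_pow (element : List Int) (exponent : Int) (f : List Int) (p : Int) (n : Int) : Prop :=
  exponent ≤ 0 ∨ (p ≠ 0 ∧ f ≠ [] ∧ f.headI ≠ 0 ∧ Int.gcd f.headI p = 1)
instance (element : List Int) (exponent : Int) (f : List Int) (p : Int) (n : Int) : Decidable (Pre_galois_pow element exponent f p n) := by unfold Pre_galois_pow; infer_instance
def pvWitness_galois_pow : List Int × Int × List Int × Int × Int := ([1, 1], 5, [1, 0, 1], 2, 2)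

def Spec_galois_pow (element : List Int) (exponent : Int) (f : List Int) (p : Int) (n : Int) (out : List Int) : Prop := out = galois_pow_alt element exponent f p n
instance (element : List Int) (exponent : Int) (f : List Int) (p : Int) (n : Int) (out : List Int) : Decidable (Spec_galois_pow element exponent f p n out) := by unfold Spec_galois_pow; infer_instance

-- ===== CLAIM (what is proved, stated in full; the proofs are below) =====
def Claim_equal_galois_pow : Prop := ∀ (element : List Int) (exponent : Int) (f : List Int) (p : Int) (n : Int), Dom_galois_pow element exponent f p n → Pre_galois_pow element exponent f p n → Spec_galois_pow element exponent f p n (galois_pow element exponent f p n)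

-- ===== LEMMAS AND PROOFS =====

-- ---- arithmetic: Python-mod facts ----
theorem pymod_bounds (a b : Int) (hb : b ≠ 0) :
    (0 < b → 0 ≤ PySem.Int.mod a b ∧ PySem.Int.mod a b < b) ∧
    (b < 0 → b < PySem.Int.mod a b ∧ PySem.Int.mod a b ≤ 0) := by
  constructor
  · intro h; exact ⟨PySem.Int.mod_nonneg a h, PySem.Int.mod_lt a h⟩
  · intro h; exact PySem.Int.mod_neg_bounds a h

theorem pymod_sub_dvd (a b : Int) : b ∣ (a - PySem.Int.mod a b) := by
  refine ⟨PySem.Int.floordiv a b, ?_⟩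
  have := PySem.Int.floordiv_mul_add_mod a b
  linarith [this]

theorem pymod_unique (a r b : Int) (hb : b ≠ 0) (hd : b ∣ (a - r))
    (hr : (0 < b → 0 ≤ r ∧ r < b) ∧ (b < 0 → b < r ∧ r ≤ 0)) :
    PySem.Int.mod a b = r := by
  have hd' : b ∣ (PySem.Int.mod a b - r) := by
    have h1 := pymod_sub_dvd a b
    have : PySem.Int.mod a b - r = (a - r) - (a - PySem.Int.mod a b) := by ring
    rw [this]; exact dvd_sub hd h1
  obtain ⟨c, hc⟩ := hd'
  have hbnd := pymod_bounds a b hb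
  rcases lt_or_gt_of_ne hb with hneg | hpos
  · have h1 := hbnd.2 hneg
    have h2 := hr.2 hneg
    rcases lt_trichotomy c 0 with hc0 | hc0 | hc0
    · nlinarith
    · rw [hc0] at hc; simp at hc; omega
    · nlinarith
  · have h1 := hbnd.1 hpos
    have h2 := hr.1 hpos
    rcases lt_trichotomy c 0 with hc0 | hc0 | hc0
    · nlinarith
    · rw [hc0] at hc; simp at hc; omega
    · nlinarith

theorem pymod_idem (a b : Int) (hb : b ≠ 0) :
    PySem.Int.mod (PySem.Int.mod a b) b = PySem.Int.mod a b :=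
  pymod_unique _ _ _ hb (by simp) (pymod_bounds a b hb)

theorem pymod_zero (b : Int) (hb : b ≠ 0) : PySem.Int.mod 0 b = 0 :=
  pymod_unique _ _ _ hb (by simp) (by constructor <;> intro h <;> omega)

theorem pymod_add_left (a c b : Int) (hb : b ≠ 0) :
    PySem.Int.mod (PySem.Int.mod a b + c) b = PySem.Int.mod (a + c) b := by
  refine pymod_unique _ _ _ hb ?_ (pymod_bounds (a + c) b hb)
  have h1 := pymod_sub_dvd a b
  have h2 := pymod_sub_dvd (a + c) b
  have : PySem.Int.mod a b + c - PySem.Int.mod (a + c) b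
      = (a + c - PySem.Int.mod (a + c) b) - (a - PySem.Int.mod a b) := by ring
  rw [this]; exact dvd_sub h2 h1

def pvCanon (p x : Int) : Prop := PySem.Int.mod x p = x

-- ---- generic list facts ----
theorem getD_set (l : List Int) (m : Nat) (v : Int) (k : Nat) :
    (l.set m v).getD k 0 = if m = k ∧ m < l.length then v else l.getD k 0 := by
  simp only [List.getD_eq_getElem?_getD, List.getElem?_set]
  by_cases h1 : m = k
  · subst h1
    by_cases h2 : m < l.length
    · simp [h2]
    · simp [h2]
  · simp [h1]

theorem list_range_sum (n : Nat) (f : Nat → Int) :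
    ((List.range n).map f).sum = ∑ i ∈ Finset.range n, f i := by
  induction n with
  | zero => simp
  | succ n ih =>
      rw [List.range_succ, List.map_append, List.sum_append, Finset.sum_range_succ, ih]
      simp

theorem getD_append_len (l1 l2 : List Int) (t : Nat) (h : l1.length = t) (h2 : l2 ≠ []) :
    (l1 ++ l2).getD t 0 = l2.headI := by
  subst h
  cases l2 with
  | nil => exact absurd rfl h2
  | cons c cs =>
      simp [List.getD_eq_getElem?_getD]

-- ---- convolution: A's scatter loops equal B's gather sums ----
-- the inner scatter loop of A's poly_mul, as structural recursion on b
def scat (p ai : Int) : List Int → Int → List Int → List Int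
  | [], _, res => res
  | x :: xs, s, res =>
      scat p ai xs (s + 1) (res.set s.toNat (PySem.Int.mod (res.getD s.toNat 0 + ai * x) p))

theorem scat_length (p ai : Int) :
    ∀ (bs : List Int) (s : Int) (res : List Int), (scat p ai bs s res).length = res.length := by
  intro bs
  induction bs with
  | nil => intro s res; rfl
  | cons x xs ih => intro s res; rw [scat, ih, List.length_set]

theorem inner_eq_scat (p ai i : Int) :
    ∀ (bs : List Int) (s : Int) (res : List Int),
    (PySem.List.enumerate bs s).foldl (fun res jb =>
        res.set (i + jb.1).toNat (PySem.Int.mod (res.getD (i + jb.1).toNat 0 + ai * jb.2) p)) res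
      = scat p ai bs (i + s) res := by
  intro bs
  induction bs with
  | nil => intro s res; rw [PySem.List.enumerate_nil]; rfl
  | cons x xs ih =>
      intro s res
      rw [PySem.List.enumerate_cons, List.foldl_cons, scat]
      have h : i + (s + 1) = (i + s) + 1 := by ring
      rw [ih (s + 1), h]

theorem scat_getD (p ai : Int) (hp : p ≠ 0) :
    ∀ (bs : List Int) (s : Int), 0 ≤ s → ∀ (res : List Int), s.toNat + bs.length ≤ res.length →
    ∀ (k : Nat),
    (scat p ai bs s res).getD k 0 =
      if s.toNat ≤ k ∧ k < s.toNat + bs.length then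
        PySem.Int.mod (res.getD k 0 + ai * bs.getD (k - s.toNat) 0) p
      else res.getD k 0 := by
  intro bs
  induction bs with
  | nil =>
      intro s hs res hlen k
      rw [scat, if_neg (show ¬(s.toNat ≤ k ∧ k < s.toNat + ([] : List Int).length) from by
        simp only [List.length_nil]; omega)]
  | cons x xs ih =>
      intro s hs res hlen k
      have hlc : s.toNat + xs.length + 1 ≤ res.length := by
        simp only [List.length_cons] at hlen; omega
      have hsl : s.toNat < res.length := by omega
      rw [scat, ih (s + 1) (by omega) _ (by rw [List.length_set]; omega) k]
      have hs1 : (s + 1).toNat = s.toNat + 1 := by omega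
      rw [hs1, getD_set]
      by_cases hk : k = s.toNat
      · rw [if_neg (show ¬(s.toNat + 1 ≤ k ∧ k < s.toNat + 1 + xs.length) from by omega),
          if_pos (show s.toNat = k ∧ s.toNat < res.length from ⟨hk.symm, hsl⟩),
          if_pos (show s.toNat ≤ k ∧ k < s.toNat + (x :: xs).length from by
            simp only [List.length_cons]; omega)]
        rw [hk, Nat.sub_self, List.getD_cons_zero]
      · rw [if_neg (show ¬(s.toNat = k ∧ s.toNat < res.length) from by
            intro h; exact hk h.1.symm)]
        by_cases hk2 : s.toNat + 1 ≤ k ∧ k < s.toNat + 1 + xs.length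
        · rw [if_pos hk2, if_pos (show s.toNat ≤ k ∧ k < s.toNat + (x :: xs).length from by
            simp only [List.length_cons]; omega)]
          have h3 : k - s.toNat = (k - (s.toNat + 1)) + 1 := by omega
          rw [h3, List.getD_cons_succ]
        · rw [if_neg hk2, if_neg (show ¬(s.toNat ≤ k ∧ k < s.toNat + (x :: xs).length) from by
            simp only [List.length_cons]; omega)]

-- the mathematical content of entry k after scattering the rows of `as_` from row index s
def Ssum (b : List Int) : List Int → Int → Nat → Int
  | [], _, _ => 0
  | x :: xs, s, k =>
      (if s.toNat ≤ k ∧ k < s.toNat + b.length then x * b.getD (k - s.toNat) 0 else 0)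
        + Ssum b xs (s + 1) k

theorem outer_length (p : Int) (b : List Int) :
    ∀ (as_ : List Int) (s : Int) (res : List Int),
    ((PySem.List.enumerate as_ s).foldl (fun res ia =>
        (PySem.List.enumerate b).foldl (fun res jb =>
          res.set (ia.1 + jb.1).toNat
            (PySem.Int.mod (res.getD (ia.1 + jb.1).toNat 0 + ia.2 * jb.2) p)) res) res).length
      = res.length := by
  intro as_
  induction as_ with
  | nil => intro s res; rw [PySem.List.enumerate_nil]; rfl
  | cons x xs ih =>
      intro s res
      rw [PySem.List.enumerate_cons, List.foldl_cons, inner_eq_scat p x s b 0, ih, scat_length]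

theorem outer_char (p : Int) (hp : p ≠ 0) (b : List Int) :
    ∀ (as_ : List Int) (s : Int), 0 ≤ s → ∀ (res : List Int) (g : Nat → Int),
    (∀ k, k < res.length → res.getD k 0 = PySem.Int.mod (g k) p) →
    s.toNat + as_.length + b.length ≤ res.length + 1 →
    ∀ k, k < res.length →
    ((PySem.List.enumerate as_ s).foldl (fun res ia =>
        (PySem.List.enumerate b).foldl (fun res jb =>
          res.set (ia.1 + jb.1).toNat
            (PySem.Int.mod (res.getD (ia.1 + jb.1).toNat 0 + ia.2 * jb.2) p)) res) res).getD k 0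
      = PySem.Int.mod (g k + Ssum b as_ s k) p := by
  intro as_
  induction as_ with
  | nil =>
      intro s hs res g hg hlen k hk
      rw [PySem.List.enumerate_nil, List.foldl_nil, Ssum, add_zero]
      exact hg k hk
  | cons x xs ih =>
      intro s hs res g hg hlen k hk
      rw [PySem.List.enumerate_cons, List.foldl_cons, inner_eq_scat p x s b 0, add_zero]
      have hblen : s.toNat + b.length ≤ res.length := by simp at hlen; omega
      have hres1 : ∀ k, k < (scat p x b s res).length →
          (scat p x b s res).getD k 0
            = PySem.Int.mod (g k + (if s.toNat ≤ k ∧ k < s.toNat + b.length then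
                x * b.getD (k - s.toNat) 0 else 0)) p := by
        intro k hk
        rw [scat_length] at hk
        rw [scat_getD p x hp b s hs res hblen k]
        by_cases hc : s.toNat ≤ k ∧ k < s.toNat + b.length
        · rw [if_pos hc, if_pos hc, hg k hk, pymod_add_left _ _ _ hp]
        · rw [if_neg hc, if_neg hc, hg k hk, add_zero]
      have := ih (s + 1) (by omega)
        (scat p x b s res)
        (fun k => g k + (if s.toNat ≤ k ∧ k < s.toNat + b.length then
            x * b.getD (k - s.toNat) 0 else 0))
        hres1
        (by rw [scat_length]; simp at hlen ⊢; omega)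
        k (by rw [scat_length]; exact hk)
      rw [this, Ssum]
      congr 1
      ring

theorem poly_mul_getD (a b : List Int) (p : Int) (hp : p ≠ 0) (k : Nat)
    (hk : k < a.length + b.length - 1) :
    (poly_mul a b p).getD k 0 = PySem.Int.mod (Ssum b a 0 k) p := by
  unfold poly_mul
  have h := outer_char p hp b a 0 (le_refl 0)
    (List.replicate (a.length + b.length - 1) 0) (fun _ => 0)
    (by
      intro k hk
      rw [List.length_replicate] at hk
      rw [List.getD_eq_getElem?_getD, List.getElem?_replicate, if_pos hk]
      simp [pymod_zero p hp])
    (by rw [List.length_replicate]; omega)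
    k (by rw [List.length_replicate]; exact hk)
  rw [h, zero_add]

theorem poly_mul_length (a b : List Int) (p : Int) :
    (poly_mul a b p).length = a.length + b.length - 1 := by
  unfold poly_mul
  rw [outer_length, List.length_replicate]

theorem pv_conv_length (a b : List Int) (p : Int) :
    (pv_conv p a b).length = a.length + b.length - 1 := by
  unfold pv_conv
  rw [List.length_map, PySem.List.length_pyRange_one]
  omega

theorem pv_conv_getD (a b : List Int) (p : Int) (k : Nat) (hk : k < a.length + b.length - 1) :
    (pv_conv p a b).getD k 0 =
      PySem.Int.mod
        (((PySem.List.pyRange (max 0 ((k : Int) - b.length + 1)) (min (a.length : Int) ((k : Int) + 1)) 1).map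
          (fun i => a.getD i.toNat 0 * b.getD ((k : Int) - i).toNat 0)).sum) p := by
  have hk' : k < (pv_conv p a b).length := by rw [pv_conv_length]; exact hk
  rw [List.getD_eq_getElem _ _ hk']
  unfold pv_conv
  rw [List.getElem_map, PySem.List.getElem_pyRange_one]
  norm_num

theorem Ssum_finset (b : List Int) :
    ∀ (as_ : List Int) (s : Int), 0 ≤ s → ∀ (k : Nat),
    Ssum b as_ s k = ∑ j ∈ Finset.range as_.length,
      (if s.toNat + j ≤ k ∧ k < s.toNat + j + b.length then
        as_.getD j 0 * b.getD (k - (s.toNat + j)) 0 else 0) := by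
  intro as_
  induction as_ with
  | nil => intro s hs k; simp [Ssum]
  | cons x xs ih =>
      intro s hs k
      have hs1 : (s + 1).toNat = s.toNat + 1 := by omega
      rw [Ssum, List.length_cons, Finset.sum_range_succ', ih (s + 1) (by omega) k, hs1]
      have hhead : (if s.toNat ≤ k ∧ k < s.toNat + b.length then x * b.getD (k - s.toNat) 0 else 0)
          = (if s.toNat + 0 ≤ k ∧ k < s.toNat + 0 + b.length then
              (x :: xs).getD 0 0 * b.getD (k - (s.toNat + 0)) 0 else 0) := by
        norm_num
      have htail : (∑ j ∈ Finset.range xs.length,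
            if s.toNat + 1 + j ≤ k ∧ k < s.toNat + 1 + j + b.length then
              xs.getD j 0 * b.getD (k - (s.toNat + 1 + j)) 0 else 0)
          = ∑ j ∈ Finset.range xs.length,
            (if s.toNat + (j + 1) ≤ k ∧ k < s.toNat + (j + 1) + b.length then
              (x :: xs).getD (j + 1) 0 * b.getD (k - (s.toNat + (j + 1))) 0 else 0) := by
        apply Finset.sum_congr rfl
        intro j _
        have e1 : s.toNat + (j + 1) = s.toNat + 1 + j := by omega
        rw [e1, List.getD_cons_succ]
      rw [hhead, htail]
      exact add_comm _ _

theorem Ssum_gather (a b : List Int) (k : Nat) :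
    Ssum b a 0 k =
      ((PySem.List.pyRange (max 0 ((k : Int) - b.length + 1)) (min (a.length : Int) ((k : Int) + 1)) 1).map
        (fun i => a.getD i.toNat 0 * b.getD ((k : Int) - i).toNat 0)).sum := by
  rw [Ssum_finset b a 0 (le_refl 0) k]
  rw [PySem.List.pyRange_one, List.map_map, list_range_sum]
  simp only [Function.comp, Int.toNat_zero, Nat.zero_add]
  rw [← Finset.sum_filter]
  have hfilter : (Finset.range a.length).filter (fun j => j ≤ k ∧ k < j + b.length)
      = Finset.Ico (max 0 ((k : Int) - b.length + 1)).toNat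
          (min (a.length : Int) ((k : Int) + 1)).toNat := by
    ext j
    simp only [Finset.mem_filter, Finset.mem_range, Finset.mem_Ico]
    omega
  rw [hfilter, Finset.sum_Ico_eq_sum_range]
  have hcnt : (min (a.length : Int) ((k : Int) + 1)).toNat
        - (max 0 ((k : Int) - b.length + 1)).toNat
      = ((min (a.length : Int) ((k : Int) + 1)) - (max 0 ((k : Int) - b.length + 1))).toNat := by
    omega
  rw [hcnt]
  apply Finset.sum_congr rfl
  intro t ht
  rw [Finset.mem_range] at ht
  have e1 : ((max 0 ((k : Int) - b.length + 1)) + (t : Int)).toNat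
      = (max 0 ((k : Int) - b.length + 1)).toNat + t := by omega
  have e2 : ((k : Int) - ((max 0 ((k : Int) - b.length + 1)) + (t : Int))).toNat
      = k - ((max 0 ((k : Int) - b.length + 1)).toNat + t) := by omega
  rw [e1, e2]

theorem conv_eq (a b : List Int) (p : Int) (hp : p ≠ 0) :
    poly_mul a b p = pv_conv p a b := by
  apply List.ext_getElem
  · rw [poly_mul_length, pv_conv_length]
  · intro k h1 h2
    rw [poly_mul_length] at h1
    rw [← List.getD_eq_getElem _ 0, ← List.getD_eq_getElem _ 0]
    rw [poly_mul_getD a b p hp k h1, pv_conv_getD a b p k h1, Ssum_gather]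

theorem conv_canon (a b : List Int) (p : Int) (hp : p ≠ 0) :
    ∀ x ∈ pv_conv p a b, pvCanon p x := by
  intro x hx
  unfold pv_conv at hx
  rw [List.mem_map] at hx
  obtain ⟨i, _, rfl⟩ := hx
  exact pymod_idem _ p hp

-- ---- division: A's long-division remainder equals B's Horner window ----
theorem mem_zipWith_mod (p factor : Int) (hp : p ≠ 0) :
    ∀ (l1 l2 : List Int) (x : Int),
      x ∈ List.zipWith (fun x d => PySem.Int.mod (x - factor * d) p) l1 l2 → pvCanon p x := by
  intro l1
  induction l1 with
  | nil => intro l2 x hx; simp at hx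
  | cons a l ih =>
      intro l2 x hx
      cases l2 with
      | nil => simp at hx
      | cons c l2 =>
          rw [List.zipWith_cons_cons] at hx
          rcases List.mem_cons.mp hx with h | h
          · rw [h]; exact pymod_idem _ p hp
          · exact ih l2 x h

theorem zip_mod_fz (p : Int) (hp : p ≠ 0) (factor : Int) (hfz : factor = 0) :
    ∀ (l1 l2 : List Int), l1.length = l2.length → (∀ x ∈ l1, pvCanon p x) →
    List.zipWith (fun x d => PySem.Int.mod (x - factor * d) p) l1 l2 = l1 := by
  subst hfz
  intro l1
  induction l1 with
  | nil => intro l2 _ _; simp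
  | cons a l ih =>
      intro l2 hlen hc
      cases l2 with
      | nil => simp at hlen
      | cons c l2 =>
          rw [List.zipWith_cons_cons,
            ih l2 (by simpa using hlen) (fun x hx => hc x (List.mem_cons_of_mem _ hx))]
          have h1 : PySem.Int.mod (a - 0 * c) p = a := by
            rw [zero_mul, sub_zero]
            exact hc a List.mem_cons_self
          rw [h1]

-- the inner subtraction loop of A's poly_div, evaluated to a zipWith on the touched block
theorem divinner (p factor : Int) (f : List Int) (i : Int) (hi : 0 ≤ i) :
    ∀ (t : Nat) (jn : Int), 0 ≤ jn → jn.toNat + t = f.length →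
    ∀ (dvd : List Int), i.toNat + f.length ≤ dvd.length →
    (PySem.List.pyRange jn (f.length : Int) 1).foldl (fun dvd j =>
        if i + j < (dvd.length : Int) then
          dvd.set (i + j).toNat
            (PySem.Int.mod (dvd.getD (i + j).toNat 0 - factor * f.getD j.toNat 0) p)
        else dvd) dvd
      = dvd.take (i.toNat + jn.toNat)
        ++ List.zipWith (fun x d => PySem.Int.mod (x - factor * d) p)
             ((dvd.drop (i.toNat + jn.toNat)).take t) (f.drop jn.toNat)
        ++ dvd.drop (i.toNat + jn.toNat + t) := by
  intro t
  induction t with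
  | zero =>
      intro jn hjn hlen dvd hdvd
      have he : PySem.List.pyRange jn (f.length : Int) 1 = [] := by
        rw [PySem.List.pyRange_one]
        have h2 : ((f.length : Int) - jn).toNat = 0 := by omega
        rw [h2]
        rfl
      have hdropf : f.drop jn.toNat = [] := by
        apply List.drop_eq_nil_of_le
        omega
      rw [he, List.foldl_nil, hdropf, List.zipWith_nil_right]
      rw [Nat.add_zero, List.append_nil, List.take_append_drop]
  | succ t ih =>
      intro jn hjn hlen dvd hdvd
      have hmlt : i.toNat + jn.toNat < dvd.length := by omega
      have hjf : jn.toNat < f.length := by omega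
      rw [PySem.List.pyRange_one_cons (by omega), List.foldl_cons]
      have hm : (i + jn).toNat = i.toNat + jn.toNat := by omega
      rw [if_pos (show i + jn < (dvd.length : Int) from by omega), hm]
      rw [show dvd.getD (i.toNat + jn.toNat) 0 = dvd[i.toNat + jn.toNat] from
        List.getD_eq_getElem dvd 0 hmlt]
      rw [show f.getD jn.toNat 0 = f[jn.toNat] from List.getD_eq_getElem f 0 hjf]
      rw [ih (jn + 1) (by omega) (by omega) _ (by rw [List.length_set]; omega)]
      have hjn1 : (jn + 1).toNat = jn.toNat + 1 := by omega
      rw [hjn1, show i.toNat + (jn.toNat + 1) = i.toNat + jn.toNat + 1 from by omega]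
      have hsplit : dvd.set (i.toNat + jn.toNat)
            (PySem.Int.mod (dvd[i.toNat + jn.toNat] - factor * f[jn.toNat]) p)
          = (dvd.take (i.toNat + jn.toNat)
              ++ [PySem.Int.mod (dvd[i.toNat + jn.toNat] - factor * f[jn.toNat]) p])
            ++ dvd.drop (i.toNat + jn.toNat + 1) := by
        rw [List.set_eq_take_cons_drop _ hmlt]
        simp
      have hTV : (dvd.take (i.toNat + jn.toNat)
            ++ [PySem.Int.mod (dvd[i.toNat + jn.toNat] - factor * f[jn.toNat]) p]).length
          = i.toNat + jn.toNat + 1 := by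
        simp only [List.length_append, List.length_take, List.length_cons, List.length_nil]
        omega
      rw [hsplit, List.take_left' hTV, List.drop_left' hTV]
      have hbig : ((dvd.take (i.toNat + jn.toNat)
              ++ [PySem.Int.mod (dvd[i.toNat + jn.toNat] - factor * f[jn.toNat]) p])
            ++ dvd.drop (i.toNat + jn.toNat + 1)).drop (i.toNat + jn.toNat + 1 + t)
          = dvd.drop (i.toNat + jn.toNat + 1 + t) := by
        have h2 : ∀ (L D : List Int), L.length = i.toNat + jn.toNat + 1 →
            (L ++ D).drop (i.toNat + jn.toNat + 1 + t) = D.drop t := by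
          intro L D hL
          have h3 : (L ++ D).drop (i.toNat + jn.toNat + 1 + t)
              = ((L ++ D).drop L.length).drop t := by
            rw [List.drop_drop]
            try (first | rfl | (congr 1; omega))
          rw [h3, List.drop_left]
        rw [h2 _ _ hTV]
        have h4 : dvd.drop (i.toNat + jn.toNat + 1 + t)
            = (dvd.drop (i.toNat + jn.toNat + 1)).drop t := by
          rw [List.drop_drop]
          try (first | rfl | (congr 1; omega))
        rw [h4]
      rw [hbig]
      rw [show i.toNat + jn.toNat + (t + 1) = i.toNat + jn.toNat + 1 + t from by omega]
      rw [List.drop_eq_getElem_cons hmlt, List.drop_eq_getElem_cons hjf,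
        List.take_succ_cons, List.zipWith_cons_cons]
      simp [List.append_assoc]

-- the outer long-division loop of A, simulated against B's Horner window
theorem div_loop_inv (p : Int) (hp : p ≠ 0) (f : List Int) (hf : f ≠ []) (h0 : f.headI ≠ 0)
    (poly : List Int) (hcanon : ∀ x ∈ poly, pvCanon p x) :
    ∀ (t : Nat), t ≤ poly.length →
    ∃ q junk w,
      ((PySem.List.pyRange 0 ((t : Nat) : Int) 1).foldl (fun st i =>
          if st.2.getD i.toNat 0 = 0 then (st.1 ++ [(0 : Int)], st.2)
          else
            (st.1 ++ [PySem.Int.mod (st.2.getD i.toNat 0 * pyInvMod f.headI p) p],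
              List.foldl (fun dvd j =>
                  if i + j < (dvd.length : Int) then
                    dvd.set (i + j).toNat
                      (PySem.Int.mod (dvd.getD (i + j).toNat 0
                        - PySem.Int.mod (st.2.getD i.toNat 0 * pyInvMod f.headI p) p
                          * f.getD j.toNat 0) p)
                  else dvd)
                st.2 (PySem.List.pyRange 0 (f.length : Int) 1)))
        (([] : List Int), List.replicate (f.length - 1) 0 ++ poly))
        = (q, junk ++ (w ++ poly.drop t))
      ∧ q.length = t ∧ junk.length = t
      ∧ w = (poly.take t).foldl (fun w c =>
          List.zipWith (fun x d =>
              PySem.Int.mod (x - PySem.Int.mod ((w ++ [c]).headI * pyInvMod f.headI p) p * d) p)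
            (w ++ [c]).tail f.tail) (List.replicate (f.length - 1) 0)
      ∧ w.length = f.length - 1 ∧ (∀ x ∈ w, pvCanon p x) := by
  have hm1 : 1 ≤ f.length := List.length_pos_iff.mpr hf
  intro t
  induction t with
  | zero =>
      intro _
      refine ⟨[], [], List.replicate (f.length - 1) 0, ?_, rfl, rfl,
        by rw [List.take_zero, List.foldl_nil], List.length_replicate, ?_⟩
      · have he : PySem.List.pyRange ((0 : Nat) : Int) 0 1 = [] := by
          rw [PySem.List.pyRange_one]
          norm_num
        rw [show (((0 : Nat) : Int)) = (0 : Int) from by norm_num] at he ⊢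
        rw [he, List.foldl_nil, List.drop_zero, List.nil_append]
      · intro x hx
        rw [List.eq_of_mem_replicate hx]
        exact pymod_zero p hp
  | succ t ih =>
      intro ht
      obtain ⟨q, junk, w, hst, hq, hjunk, hw, hwlen, hwc⟩ := ih (by omega)
      have htlt : t < poly.length := by omega
      have hcast : (((t + 1 : Nat)) : Int) = ((t : Nat) : Int) + 1 := by push_cast; ring
      rw [hcast, PySem.List.pyRange_one_succ_right (by positivity), List.foldl_append, hst,
        List.foldl_cons, List.foldl_nil]
      have hdt : poly.drop t = poly[t] :: poly.drop (t + 1) := List.drop_eq_getElem_cons htlt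
      have hcanon_c : pvCanon p poly[t] := hcanon _ (List.getElem_mem htlt)
      -- the current head coefficient seen by A is the head of B's block
      have hcurr : (junk ++ (w ++ poly.drop t)).getD ((t : Int)).toNat 0
          = (w ++ [poly[t]]).headI := by
        rw [show ((t : Int)).toNat = t from by omega, hdt]
        cases w with
        | nil =>
            rw [getD_append_len junk _ t hjunk (by simp <;> omega)]
            rfl
        | cons y w2 =>
            rw [getD_append_len junk _ t hjunk (by simp <;> omega)]
            rfl
      dsimp only
      rw [hcurr]
      -- B's one Horner step
      have hwstep : (poly.take (t + 1)).foldl (fun w c =>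
            List.zipWith (fun x d =>
                PySem.Int.mod (x - PySem.Int.mod ((w ++ [c]).headI * pyInvMod f.headI p) p * d) p)
              (w ++ [c]).tail f.tail) (List.replicate (f.length - 1) 0)
          = List.zipWith (fun x d =>
              PySem.Int.mod (x - PySem.Int.mod ((w ++ [poly[t]]).headI * pyInvMod f.headI p) p * d) p)
            (w ++ [poly[t]]).tail f.tail := by
        rw [List.take_succ, List.getElem?_eq_getElem htlt]
        rw [List.foldl_append, ← hw]
        simp only [Option.toList_some, List.foldl_cons, List.foldl_nil]
      have htail_canon : ∀ x ∈ (w ++ [poly[t]]).tail, pvCanon p x := by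
        intro x hx
        have hx2 : x ∈ w ++ [poly[t]] := List.mem_of_mem_tail hx
        rcases List.mem_append.mp hx2 with h | h
        · exact hwc x h
        · rw [List.mem_singleton.mp h]
          exact hcanon_c
      have htail_len : (w ++ [poly[t]]).tail.length = f.length - 1 := by
        simp [List.length_tail, hwlen]
      by_cases hz : (w ++ [poly[t]]).headI = 0
      · rw [if_pos hz]
        refine ⟨q ++ [(0 : Int)], junk ++ [(w ++ [poly[t]]).headI], (w ++ [poly[t]]).tail,
          ?_, by simp [hq], by simp [hjunk], ?_, htail_len, htail_canon⟩
        · have hsplit : junk ++ (w ++ poly.drop t)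
              = (junk ++ [(w ++ [poly[t]]).headI]) ++ ((w ++ [poly[t]]).tail ++ poly.drop (t + 1)) := by
            rw [hdt]
            cases w <;> simp
          rw [hsplit]
        · rw [hwstep]
          rw [zip_mod_fz p hp _ (by rw [hz, zero_mul, pymod_zero p hp]) _ _
            (by rw [htail_len]; simp) htail_canon]
      · rw [if_neg hz]
        -- evaluate the inner subtraction loop
        have hdl : (junk ++ (w ++ poly.drop t)).length = t + (f.length - 1) + (poly.length - t) := by
          simp [hjunk, hwlen]
          omega
        have hinner := divinner p
          (PySem.Int.mod ((w ++ [poly[t]]).headI * pyInvMod f.headI p) p)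
          f ((t : Nat) : Int) (by positivity) f.length 0 (le_refl 0) (by simp)
          (junk ++ (w ++ poly.drop t)) (by rw [hdl]; omega)
        rw [hinner]
        rw [show List.drop (Int.toNat 0) f = f from by norm_num]
        rw [show ((t : Nat) : Int).toNat + Int.toNat 0 = t from by omega]
        -- the touched block is exactly w ++ [poly[t]]
        have hdrop_t : (junk ++ (w ++ poly.drop t)).drop t = w ++ poly.drop t := by
          rw [show t = junk.length from hjunk.symm, List.drop_left]
        have htake_t : (junk ++ (w ++ poly.drop t)).take t = junk := by
          rw [show t = junk.length from hjunk.symm, List.take_left]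
        have hblock : (w ++ poly.drop t) = (w ++ [poly[t]]) ++ poly.drop (t + 1) := by
          rw [hdt]
          simp
        have hblen : (w ++ [poly[t]]).length = f.length := by
          simp [hwlen]
          omega
        have htakeblk : ((junk ++ (w ++ poly.drop t)).drop t).take f.length = w ++ [poly[t]] := by
          rw [hdrop_t, hblock, ← hblen, List.take_left]
        have hdropblk : (junk ++ (w ++ poly.drop t)).drop (t + f.length) = poly.drop (t + 1) := by
          have h5 : (junk ++ (w ++ poly.drop t)).drop (t + f.length)
              = ((junk ++ (w ++ poly.drop t)).drop t).drop f.length := by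
            rw [List.drop_drop]
            try (first | rfl | (congr 1; omega))
          rw [h5, hdrop_t, hblock, ← hblen, List.drop_left]
        rw [htake_t, htakeblk, hdropblk]
        -- split the zipWith into its head (new junk entry) and tail (B's window)
        obtain ⟨bh, bt, hbe⟩ : ∃ bh bt, w ++ [poly[t]] = bh :: bt := by
          cases w with
          | nil => exact ⟨_, _, rfl⟩
          | cons y w2 => exact ⟨_, _, rfl⟩
        obtain ⟨fh, ft, hfe⟩ : ∃ fh ft, f = fh :: ft := by
          cases f with
          | nil => exact absurd rfl hf
          | cons a l => exact ⟨_, _, rfl⟩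
        refine ⟨q ++ [PySem.Int.mod ((w ++ [poly[t]]).headI * pyInvMod f.headI p) p],
          junk ++ [PySem.Int.mod (bh - PySem.Int.mod ((w ++ [poly[t]]).headI * pyInvMod f.headI p) p * fh) p],
          List.zipWith (fun x d =>
              PySem.Int.mod (x - PySem.Int.mod ((w ++ [poly[t]]).headI * pyInvMod f.headI p) p * d) p)
            bt ft,
          ?_, by simp [hq], by simp [hjunk], ?_, ?_, ?_⟩
        · rw [hbe, hfe, List.zipWith_cons_cons]
          simp [List.append_assoc, List.headI]
        · rw [hwstep, hbe, hfe]
          rfl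
        · rw [List.length_zipWith]
          have hbt : bt.length = f.length - 1 := by
            have := congrArg List.length hbe
            simp at this
            omega
          have hft : ft.length = f.length - 1 := by
            have := congrArg List.length hfe
            simp at this
            omega
          omega
        · intro x hx
          exact mem_zipWith_mod p _ hp bt ft x hx

theorem div_eq (poly f : List Int) (p : Int) (hp : p ≠ 0) (hf : f ≠ []) (h0 : f.headI ≠ 0)
    (hcanon : ∀ x ∈ poly, pvCanon p x) :
    (poly_div poly f p).2 = pv_reduce f p poly := by
  have hflen : ¬ (f.length = 0) := by simpa [List.length_eq_zero_iff] using hf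
  unfold poly_div pv_reduce
  rw [if_neg hflen]
  rw [if_neg h0]
  dsimp only
  have hN : ((List.replicate (f.length - 1) 0 ++ poly).length : Int) - (f.length : Int) + 1
      = ((poly.length : Nat) : Int) := by
    simp [List.length_append, List.length_replicate]
    omega
  rw [hN]
  obtain ⟨q, junk, w, hst, hq, hjunk, hw, hwlen, hwc⟩ :=
    div_loop_inv p hp f hf h0 poly hcanon poly.length (le_refl _)
  rw [hst]
  dsimp only
  rw [show (((poly.length : Nat) : Int)).toNat = poly.length from by omega]
  rw [show List.take poly.length q = q from by rw [← hq, List.take_length]]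
  rw [List.drop_length, List.append_nil]
  rw [show List.drop q.length (junk ++ w) = w from by rw [hq, ← hjunk, List.drop_left]]
  rw [hw, List.take_length]

theorem mult_eq (p n : Int) (f a b : List Int) (hp : p ≠ 0) (hf : f ≠ []) (h0 : f.headI ≠ 0) :
    poly_mult_GF p n f a b = pv_mult p n f a b := by
  simp only [poly_mult_GF, pv_mult, conv_eq a b p hp,
    div_eq _ f p hp hf h0 (conv_canon a b p hp)]

theorem go_eq (f : List Int) (p n : Int) (hp : p ≠ 0) (hf : f ≠ []) (h0 : f.headI ≠ 0) :
    ∀ (k : Nat) (e : Int), e.toNat = k → ∀ (r c : List Int),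
      galois_pow_go f p n r c e = galois_pow_alt_go f p n r c e := by
  intro k
  induction k using Nat.strong_induction_on with
  | _ k ih =>
    intro e hk r c
    rw [galois_pow_go, galois_pow_alt_go]
    by_cases h : 0 < e
    · have h' : ¬ e ≤ 0 := by omega
      simp only [h, h', dite_true, dite_false]
      have hlt : (PySem.Int.floordiv e 2).toNat < k := by
        rw [PySem.Int.floordiv_eq_ediv_of_pos (by norm_num : (0:Int) < 2)]
        omega
      rw [mult_eq p n f r c hp hf h0, mult_eq p n f c c hp hf h0]
      exact ih _ hlt _ rfl _ _
    · have h' : e ≤ 0 := by omega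
      simp [h, h']

-- ===== VERDICT (by name: the statement is the Claim_ definition above) =====
theorem galois_pow_spec : Claim_equal_galois_pow := by
  intro element exponent f p n _ hpre
  unfold Spec_galois_pow galois_pow galois_pow_alt
  rcases hpre with he | ⟨hp, hf, h0, _⟩
  · rw [galois_pow_go, galois_pow_alt_go]
    have h1 : ¬ 0 < exponent := by omega
    simp [h1, he]
  · exact go_eq f p n hp hf h0 exponent.toNat exponent rfl _ element
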